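-- pv_equiv track=rewrite | github.com/Nathan3-14/encr | main.py | decr
-- ===== SOURCE A (Python) =====
-- alphabet = "abcdefghijklmnopqrstuvwxyz 0123456789"
--
-- def decr(encrypted: str) -> str:
--     message = ""
--     global_decr_offset = alphabet.index(encrypted[0])
--
--     # for index, char in tqdm(enumerate(encrypted[1:])):
--     for index, char in enumerate(encrypted[1:]):
--         if index%2 == 0:
--             char_decr_index = alphabet.index(char) + global_decr_offset
--         else:
--             char_decr = alphabet.index(char) - char_decr_index
--             while char_decr < 0:
--                 char_decr += len(alphabet)
--             message += alphabet[char_decr]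
--
--     return message
-- ===== SOURCE B (Python) =====
-- alphabet = "abcdefghijklmnopqrstuvwxyz 0123456789"
--
-- def decr(encrypted: str) -> str:
--     off = alphabet.index(encrypted[0])
--     n = len(alphabet)
--
--     def solve(s: str) -> str:
--         # divide and conquer on the key/data pair stream; split at an even index
--         if len(s) < 2:
--             return ""
--         if len(s) == 2:
--             return alphabet[(alphabet.index(s[1]) - alphabet.index(s[0]) - off) % n]
--         m = ((len(s) // 2 + 1) // 2) * 2
--         return solve(s[:m]) + solve(s[m:])
--
--     return solve(encrypted[1:])
-- ===== Notes on version B (the rewrite author's own statement) =====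
-- stated objective: alternative
-- what changed: Replaces A's single linear pass (parity-branching enumerate loop with carried char_decr_index state and a while-loop normalisation) by a divide-and-conquer recursion that splits the pair stream at an even index, decodes each two-character leaf with one modulo reduction, and concatenates the halves.
import Mathlib
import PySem

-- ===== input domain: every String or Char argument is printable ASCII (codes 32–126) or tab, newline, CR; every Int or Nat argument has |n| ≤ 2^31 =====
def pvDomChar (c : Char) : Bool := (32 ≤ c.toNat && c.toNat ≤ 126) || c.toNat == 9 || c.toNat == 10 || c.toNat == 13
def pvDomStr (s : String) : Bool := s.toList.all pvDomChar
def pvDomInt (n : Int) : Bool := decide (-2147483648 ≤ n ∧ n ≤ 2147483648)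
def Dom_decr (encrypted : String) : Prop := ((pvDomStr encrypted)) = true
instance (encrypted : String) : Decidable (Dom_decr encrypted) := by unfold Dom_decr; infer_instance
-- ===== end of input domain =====

-- B replaces A's linear parity-branching loop with carried state and a while-normalisation by a
-- divide-and-conquer recursion splitting the pair stream at an even index (objective: alternative).

-- module-level constant: alphabet = "abcdefghijklmnopqrstuvwxyz 0123456789"
def alph : List Char :=
  ['a','b','c','d','e','f','g','h','i','j','k','l','m','n','o','p','q','r','s','t','u','v','w','x','y','z',
   ' ','0','1','2','3','4','5','6','7','8','9']

-- alphabet.index(c); Python raises ValueError when c ∉ alph — excluded by Pre_, so the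
-- default 0 is never reached on admitted inputs.
def idx (c : Char) : Int := (((PySem.List.index? alph c).getD 0 : Nat) : Int)

-- ===== PORT A =====
-- the 'while char_decr < 0: char_decr += len(alphabet)' loop (len(alphabet) = 37)
def decrWhile (x : Int) : Int :=
  if x < 0 then decrWhile (x + PySem.List.len alph) else x
termination_by (-x).toNat
decreasing_by
  have h : PySem.List.len alph = 37 := by decide
  omega

def decr (encrypted : String) : String :=
  match PySem.Str.pyGet? encrypted 0 with
  | none => ""      -- Python: IndexError on empty input (excluded by Pre_)
  | some c0 =>
    let global_decr_offset := idx c0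
    let body := PySem.List.slice encrypted.toList (some 1) none   -- encrypted[1:]
    let st := (PySem.List.enumerate body 0).foldl
      (fun (st : List Char × Int) (p : Int × Char) =>
        if PySem.Int.mod p.1 2 == 0 then
          (st.1, idx p.2 + global_decr_offset)
        else
          let char_decr := decrWhile (idx p.2 - st.2)
          -- alphabet[char_decr]: in range on admitted inputs
          (st.1 ++ [PySem.List.pyGetD alph char_decr ' '], st.2))
      ([], 0)
    String.ofList st.1

-- ===== PORT B =====
-- solve(s): divide and conquer on the pair stream; split point m = ((len(s)//2 + 1)//2)*2 is even.
-- fuel is only a structural totality guard (fuel = len s at the call site; the 0 branch is never reached).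
def solveB (off : Int) : Nat → List Char → List Char
  | 0, _ => []
  | fuel + 1, s =>
    if (s.length : Int) < 2 then []
    else if (s.length : Int) == 2 then
      [PySem.List.pyGetD alph
        (PySem.Int.mod (idx (PySem.List.pyGetD s 1 ' ') - idx (PySem.List.pyGetD s 0 ' ') - off)
          (PySem.List.len alph)) ' ']
    else
      let m : Int := PySem.Int.floordiv (PySem.Int.floordiv (s.length : Int) 2 + 1) 2 * 2
      solveB off fuel (PySem.List.slice s none (some m)) ++
        solveB off fuel (PySem.List.slice s (some m) none)

def decr_alt (encrypted : String) : String :=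
  match PySem.Str.pyGet? encrypted 0 with
  | none => ""      -- Python: IndexError on empty input (excluded by Pre_)
  | some c0 =>
    let off := idx c0
    let body := PySem.List.slice encrypted.toList (some 1) none
    String.ofList (solveB off body.length body)

-- ===== PRECONDITION & SPEC =====
-- Pre_ = exactly the inputs where Python A returns: nonempty (else IndexError on encrypted[0])
-- and every character in the alphabet (else ValueError from alphabet.index).
def Pre_decr (encrypted : String) : Prop :=
  encrypted.toList ≠ [] ∧ encrypted.toList.all (fun c => alph.contains c) = true
instance (encrypted : String) : Decidable (Pre_decr encrypted) := by unfold Pre_decr; infer_instance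

def pvWitness_decr : String := "aab"

def Spec_decr (encrypted : String) (out : String) : Prop := out = decr_alt encrypted
instance (encrypted : String) (out : String) : Decidable (Spec_decr encrypted out) := by unfold Spec_decr; infer_instance

-- ===== CLAIM =====
def Claim_equal_decr : Prop := ∀ (encrypted : String), Dom_decr encrypted → Pre_decr encrypted → Spec_decr encrypted (decr encrypted)

-- ===== LEMMAS AND PROOFS =====

-- consecutive disjoint pairs of a list (odd tail dropped): the common shape of both ports
def pairs : List Char → List (Char × Char)
  | [] => []
  | [_] => []
  | k :: d :: t => (k, d) :: pairs t

lemma len_alph : PySem.List.len alph = 37 := by decide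

lemma idx_bounds (c : Char) : 0 ≤ idx c ∧ idx c ≤ 36 := by
  unfold idx
  cases h : PySem.List.index? alph c with
  | none => simp
  | some k =>
    obtain ⟨hk, -, -⟩ := PySem.List.getElem_of_index?_eq_some h
    have h37 : alph.length = 37 := by decide
    simp only [Option.getD_some]
    omega

lemma decrWhile_eq_mod (x : Int) (h1 : -74 ≤ x) (h2 : x ≤ 36) :
    decrWhile x = PySem.Int.mod x 37 := by
  rw [decrWhile, len_alph]
  split_ifs with hx
  · rw [decrWhile, len_alph]
    split_ifs with hx2
    · rw [decrWhile, len_alph]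
      split_ifs with hx3
      · omega
      · rw [PySem.Int.mod_eq_emod_of_pos (by omega)]; omega
    · rw [PySem.Int.mod_eq_emod_of_pos (by omega)]; omega
  · rw [PySem.Int.mod_eq_emod_of_pos (by omega)]; omega

-- A's enumerate/parity fold, started at an even index, produces exactly the pair-wise map.
lemma foldA (off : Int) :
    ∀ (l : List Char) (s : Int), s % 2 = 0 → ∀ (msg : List Char) (c : Int),
    ((PySem.List.enumerate l s).foldl
      (fun (st : List Char × Int) (p : Int × Char) =>
        if PySem.Int.mod p.1 2 == 0 then
          (st.1, idx p.2 + off)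
        else
          (st.1 ++ [PySem.List.pyGetD alph (decrWhile (idx p.2 - st.2)) ' '], st.2))
      (msg, c)).1
    = msg ++ (pairs l).map (fun p =>
        PySem.List.pyGetD alph (decrWhile (idx p.2 - (idx p.1 + off))) ' ') := by
  intro l
  induction l using pairs.induct with
  | case1 => intro s hs msg c; simp [PySem.List.enumerate_nil, pairs]
  | case2 k =>
    intro s hs msg c
    have h1 : PySem.Int.mod s 2 = 0 := by
      rw [PySem.Int.mod_eq_emod_of_pos (by omega)]; omega
    simp only [PySem.List.enumerate_cons, PySem.List.enumerate_nil, List.foldl_cons,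
      List.foldl_nil, h1]
    have e0 : ((0 : Int) == 0) = true := by decide
    simp [pairs]
  | case3 k d t ih =>
    intro s hs msg c
    have h1 : PySem.Int.mod s 2 = 0 := by
      rw [PySem.Int.mod_eq_emod_of_pos (by omega)]; omega
    have h2 : PySem.Int.mod (s + 1) 2 = 1 := by
      rw [PySem.Int.mod_eq_emod_of_pos (by omega)]; omega
    simp only [PySem.List.enumerate_cons, List.foldl_cons, h1, h2]
    have e0 : ((0 : Int) == 0) = true := by decide
    have e1 : ((1 : Int) == 0) = false := by decide
    simp only [e0, e1, if_true]
    rw [ih (s + 1 + 1) (by omega)]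
    simp [pairs]

-- splitting at an even index respects pairing
lemma pairs_append_even : ∀ (l r : List Char), l.length % 2 = 0 →
    pairs (l ++ r) = pairs l ++ pairs r := by
  intro l
  induction l using pairs.induct with
  | case1 => intro r _; simp [pairs]
  | case2 k => intro r h; simp at h
  | case3 k d t ih =>
    intro r h
    simp only [List.length_cons] at h
    simp only [List.cons_append, pairs, List.cons_append]
    rw [ih r (by omega)]

-- B's divide-and-conquer computes the pair-wise map (fuel is a bound, not part of the result)
lemma solveB_pairs (off : Int) : ∀ (fuel : Nat) (s : List Char), s.length ≤ fuel →
    solveB off fuel s = (pairs s).map (fun p =>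
      PySem.List.pyGetD alph
        (PySem.Int.mod (idx p.2 - idx p.1 - off) (PySem.List.len alph)) ' ') := by
  intro fuel
  induction fuel with
  | zero =>
    intro s hs
    match s, hs with
    | [], _ => simp [solveB, pairs]
  | succ fuel ih =>
    intro s hs
    rw [solveB]
    split_ifs with h1 h2
    · match s, h1 with
      | [], _ => simp [pairs]
      | [a], _ => simp [pairs]
    · simp only [beq_iff_eq] at h2
      match s, h2 with
      | [a, b], _ => simp [pairs, PySem.List.pyGetD]
    · simp only [beq_iff_eq] at h1 h2
      have hL : 3 ≤ s.length := by omega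
      set m : Int := PySem.Int.floordiv (PySem.Int.floordiv (s.length : Int) 2 + 1) 2 * 2 with hm
      have hmb : 2 ≤ m ∧ m ≤ (s.length : Int) - 1 ∧ ∃ k : Int, m = 2 * k := by
        rw [hm, PySem.Int.floordiv_eq_ediv_of_pos (by omega),
          PySem.Int.floordiv_eq_ediv_of_pos (by omega)]
        refine ⟨by omega, by omega, (↑s.length / 2 + 1) / 2, by ring⟩
      obtain ⟨hm2, hmL, k, hk⟩ := hmb
      show solveB off fuel (PySem.List.slice s none (some m)) ++
          solveB off fuel (PySem.List.slice s (some m) none) = _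
      rw [PySem.List.slice_to s (by omega), PySem.List.slice_from s (by omega)]
      have hlen_t : (s.take m.toNat).length = m.toNat := by
        simp only [List.length_take]; omega
      rw [ih _ (by omega), ih _ (by simp; omega)]
      rw [← List.map_append, ← pairs_append_even _ _ (by omega), List.take_append_drop]

theorem decr_spec : Claim_equal_decr := by
  unfold Claim_equal_decr
  intro encrypted _ _
  unfold Spec_decr decr decr_alt
  cases h : PySem.Str.pyGet? encrypted 0 with
  | none => rfl
  | some c0 =>
    simp only
    rw [foldA (idx c0) _ 0 (by omega)]
    rw [solveB_pairs (idx c0) _ _ le_rfl]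
    congr 1
    apply List.map_congr_left
    intro p _
    have hb1 := idx_bounds p.1
    have hb2 := idx_bounds p.2
    have hb0 := idx_bounds c0
    rw [decrWhile_eq_mod _ (by omega) (by omega), len_alph]
    have hXY : idx p.2 - (idx p.1 + idx c0) = idx p.2 - idx p.1 - idx c0 := by ring
    rw [hXY]
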